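-- pv_equiv track=rewrite | github.com/Mihretthe/Competitive-Programming | JaggedSwap.py | canBeSorted
-- ===== SOURCE A (Python) =====
-- def canBeSorted(nums, n):
--     i = 1
--     while i < n - 1:
--         if nums[i] > nums[i - 1] and nums[i] > nums[i + 1]:
--             nums[i], nums[i + 1] = nums[i + 1], nums[i]
--             i = 1
--         else:
--             i += 1
--     r = list(range(1, n + 1))
--     return r == nums
-- ===== SOURCE B (Python) =====
-- def canBeSorted(nums, n):
--     # Position 0 is never touched by the peak-bubbling process, and the process
--     # fully sorts the array exactly when it is a permutation of 1..n whose first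
--     # element is already 1.  (Unlike A, this does not mutate nums in place.)
--     if sorted(nums) != list(range(1, n + 1)):
--         return False
--     return len(nums) == 0 or nums[0] == 1
-- ===== Notes on version B (the rewrite author's own statement) =====
-- stated objective: faster
-- what changed: B replaces the whole peak-bubbling simulation by a closed-form test: the loop never touches position 0 and sorts the array exactly when it is a permutation of 1..n starting with 1, so B just compares sorted(nums) with range(1,n+1) and checks nums[0]==1; B does not mutate nums (A sorts it in place).
-- outside the precondition, e.g. on canBeSorted([4, 1, 1], 4): A returns False, B returns False
import Mathlib
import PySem

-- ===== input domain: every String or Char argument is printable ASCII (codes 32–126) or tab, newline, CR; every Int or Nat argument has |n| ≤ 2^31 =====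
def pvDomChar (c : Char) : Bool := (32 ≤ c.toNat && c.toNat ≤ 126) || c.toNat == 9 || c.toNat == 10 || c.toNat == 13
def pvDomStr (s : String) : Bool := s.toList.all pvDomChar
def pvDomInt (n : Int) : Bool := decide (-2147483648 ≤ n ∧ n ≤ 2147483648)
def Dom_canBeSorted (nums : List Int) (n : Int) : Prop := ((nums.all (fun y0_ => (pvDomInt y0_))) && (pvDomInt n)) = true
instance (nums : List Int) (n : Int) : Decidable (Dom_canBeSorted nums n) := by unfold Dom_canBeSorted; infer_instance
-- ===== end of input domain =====

-- B replaces A's O(n^3) peak-bubbling simulation by a closed-form permutation test (faster;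
-- return value only: A also sorts `nums` in place, B does not mutate it).


-- ===== PORT A =====

-- number of inversions: termination measure for A's while loop (each swap removes exactly one)
def pvInv : List Int → Nat
  | [] => 0
  | x :: xs => xs.countP (fun y => decide (y < x)) + pvInv xs

theorem pvSwap_perm (l : List Int) (j : Nat) (a b : Int)
    (ha : l[j]? = some a) (hb : l[j+1]? = some b) :
    ((l.set j b).set (j+1) a).Perm l := by
  induction l generalizing j with
  | nil => simp at ha
  | cons x t ih =>
    cases j with
    | zero =>
      cases t with
      | nil => simp at hb
      | cons y u =>
        simp at ha hb
        subst ha hb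
        simpa [List.set] using List.Perm.swap x y u
    | succ k =>
      simp at ha hb
      simpa [List.set] using List.Perm.cons x (ih k ha hb)

theorem pvInv_swap (l : List Int) (j : Nat) (a b : Int)
    (ha : l[j]? = some a) (hb : l[j+1]? = some b) (hlt : b < a) :
    pvInv ((l.set j b).set (j+1) a) < pvInv l := by
  induction l generalizing j with
  | nil => simp at ha
  | cons x t ih =>
    cases j with
    | zero =>
      cases t with
      | nil => simp at hb
      | cons y u =>
        simp at ha hb
        subst ha hb
        have hxy : ¬ (x < y) := lt_asymm hlt
        simp [List.set, pvInv, hlt, hxy]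
        omega
    | succ k =>
      simp at ha hb
      have h2 := ih k ha hb
      have hc : ((t.set k b).set (k+1) a).countP (fun y => decide (y < x)) = t.countP (fun y => decide (y < x)) :=
        (pvSwap_perm t k a b ha hb).countP_eq _
      simp [List.set, pvInv]
      omega

-- A's while loop over the state (nums, i); the `_, _, _` arm is Python's IndexError (outside Pre_).
def pvLoop (n : Int) (l : List Int) (i : Int) : List Int :=
  if i < n - 1 then
    match ha : l[i.toNat]?, hp : l[i.toNat - 1]?, hb : l[i.toNat + 1]? with
    | some a, some p, some b =>
      if a > p ∧ a > b then
        pvLoop n ((l.set i.toNat b).set (i.toNat + 1) a) 1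
      else
        pvLoop n l (i + 1)
    | _, _, _ => l
  else l
termination_by (pvInv l, (n - 1 - i).toNat)
decreasing_by
  · exact Prod.Lex.left _ _ (pvInv_swap l i.toNat a b ha hb (by omega))
  · apply Prod.Lex.right; omega

def canBeSorted (nums : List Int) (n : Int) : Bool :=
  decide (PySem.List.pyRange 1 (n + 1) 1 = pvLoop n nums 1)

-- ===== PORT B =====
def canBeSorted_alt (nums : List Int) (n : Int) : Bool :=
  if ¬ (PySem.List.sorted nums (fun x => x) false = PySem.List.pyRange 1 (n + 1) 1) then
    false
  else
    decide (nums.length = 0) || decide (PySem.List.pyGetD nums 0 0 = 1)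

-- ===== PRECONDITION & SPEC =====
-- Pre_ excludes n ≥ 3 with len(nums) < n: there A either raises IndexError scanning past the end,
-- or (only when len = n-1 and its data-dependent run never probes index n-1) returns False after
-- reading past the conceptual n-element array — no closed-form input condition separates the two,
-- so the whole region is excluded; B naturally returns False on all of it.
def Pre_canBeSorted (nums : List Int) (n : Int) : Prop :=
  n ≤ (nums.length : Int) ∨ n ≤ 2
instance (nums : List Int) (n : Int) : Decidable (Pre_canBeSorted nums n) := by
  unfold Pre_canBeSorted; infer_instance

def pvWitness_canBeSorted : List Int × Int := ([1, 3, 2], 3)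


def Spec_canBeSorted (nums : List Int) (n : Int) (out : Bool) : Prop := out = canBeSorted_alt nums n
instance (nums : List Int) (n : Int) (out : Bool) : Decidable (Spec_canBeSorted nums n out) := by unfold Spec_canBeSorted; infer_instance

-- ===== CLAIM (what is proved, stated in full; the proofs are below) =====
def Claim_equal_canBeSorted : Prop := ∀ (nums : List Int) (n : Int), Dom_canBeSorted nums n → Pre_canBeSorted nums n → Spec_canBeSorted nums n (canBeSorted nums n)

-- ===== LEMMAS AND PROOFS =====

-- strict local peak at interior position j (indices valid wherever this is used)
def pvPeak (l : List Int) (j : Nat) : Prop :=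
  l.getD (j - 1) 0 < l.getD j 0 ∧ l.getD (j + 1) 0 < l.getD j 0

theorem pvLoop_spec (n : Int) (l : List Int) (i : Int) :
    n ≤ (l.length : Int) → 1 ≤ i →
    (∀ j : Nat, 1 ≤ j → (j : Int) < i → ¬ pvPeak l j) →
    (pvLoop n l i).Perm l ∧ (pvLoop n l i)[0]? = l[0]? ∧
      (∀ j : Nat, 1 ≤ j → (j : Int) < n - 1 → ¬ pvPeak (pvLoop n l i) j) := by
  induction l, i using pvLoop.induct n with
  | case1 l i hlt a p b ha hp hb hcond ih =>
    intro hlen hi hinv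
    rw [pvLoop, if_pos hlt, ha, hp, hb]
    simp only [if_pos hcond]
    have hj0 : i.toNat ≠ 0 := by omega
    have hlen' : n ≤ (((l.set i.toNat b).set (i.toNat + 1) a).length : Int) := by
      simpa using hlen
    obtain ⟨ihp, ihh, ihn⟩ := ih hlen' (by omega) (by intro j hj1 hj2; omega)
    refine ⟨ihp.trans (pvSwap_perm l i.toNat a b ha hb), ?_, ihn⟩
    rw [ihh, List.getElem?_set_ne (by omega), List.getElem?_set_ne (by omega)]
  | case2 l i hlt a p b ha hp hb hcond ih =>
    intro hlen hi hinv
    rw [pvLoop, if_pos hlt, ha, hp, hb]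
    simp only [if_neg hcond]
    refine ih hlen (by omega) ?_
    intro j hj1 hj2
    by_cases hje : (j : Int) = i
    · intro hpk
      apply hcond
      have hja : j = i.toNat := by omega
      unfold pvPeak at hpk
      rw [hja, List.getD_eq_getElem?_getD, List.getD_eq_getElem?_getD, List.getD_eq_getElem?_getD,
        ha, hp, hb] at hpk
      simp at hpk
      exact ⟨hpk.1, hpk.2⟩
    · exact hinv j hj1 (by omega)
  | case3 l i hlt hnone =>
    intro hlen hi hinv
    exfalso
    have h1 : i.toNat < l.length := by omega
    have h2 : i.toNat - 1 < l.length := by omega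
    have h3 : i.toNat + 1 < l.length := by omega
    exact hnone _ _ _ (List.getElem?_eq_getElem h1) (List.getElem?_eq_getElem h2) (List.getElem?_eq_getElem h3)
  | case4 l i hlt =>
    intro hlen hi hinv
    rw [pvLoop, if_neg hlt]
    refine ⟨List.Perm.refl l, rfl, ?_⟩
    intro j hj1 hj2
    exact hinv j hj1 (by omega)

theorem pvSortedOfNoPeak (T : List Int) (n : Int)
    (hperm : T.Perm (PySem.List.pyRange 1 (n + 1) 1)) (h0 : T[0]? = some 1)
    (hnp : ∀ j : Nat, 1 ≤ j → (j : Int) < n - 1 → ¬ pvPeak T j) :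
    T.Pairwise (· < ·) := by
  have hnd : T.Nodup := hperm.nodup_iff.mpr (PySem.List.nodup_pyRange_one 1 (n+1))
  have hlenT : T.length = (n : Int).toNat := by
    have := hperm.length_eq
    rw [PySem.List.length_pyRange_one] at this
    omega
  have hmem : ∀ x ∈ T, 1 ≤ x := by
    intro x hx
    have := (PySem.List.mem_pyRange_one).mp (hperm.mem_iff.mp hx)
    omega
  have adj : ∀ k (h : k + 1 < T.length), T[k] < T[k+1] := by
    intro k
    induction k with
    | zero =>
      intro h
      have h0' : T[0] = 1 := by
        rw [List.getElem?_eq_getElem (by omega)] at h0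
        simpa using h0
      show T[0] < T[1]
      have h1m : 1 ≤ T[1] := hmem _ (List.getElem_mem (show 1 < T.length by omega))
      have hne : T[0] ≠ T[1] := by
        intro he
        have := (List.Nodup.getElem_inj_iff hnd).mp he
        omega
      omega
    | succ k ihk =>
      intro h
      have hk1 : k + 1 < T.length := by omega
      have ih := ihk (by omega)
      have hne : T[k+1] ≠ T[k+2] := by
        intro he
        have := (List.Nodup.getElem_inj_iff hnd).mp he
        omega
      show T[k+1] < T[k+2]
      by_contra hle
      have hgt : T[k+2] < T[k+1] := by omega
      have hbound : ((k+1 : Nat) : Int) < n - 1 := by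
        have h2 : k + 2 < (n : Int).toNat := by omega
        omega
      apply hnp (k+1) (by omega) hbound ?_
      · constructor
        · have e1 : T.getD (k+1-1) 0 = T[k] := by
            rw [List.getD_eq_getElem?_getD]
            simp [List.getElem?_eq_getElem (show k < T.length by omega)]
          have e2 : T.getD (k+1) 0 = T[k+1] := by
            rw [List.getD_eq_getElem?_getD]
            simp [List.getElem?_eq_getElem hk1]
          have e3 : T.getD (k+1+1) 0 = T[k+2] := by
            rw [List.getD_eq_getElem?_getD]
            simp [List.getElem?_eq_getElem h]
          rw [e1, e2]
          exact ih
        · have e2 : T.getD (k+1) 0 = T[k+1] := by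
            rw [List.getD_eq_getElem?_getD]
            simp [List.getElem?_eq_getElem hk1]
          have e3 : T.getD (k+1+1) 0 = T[k+2] := by
            rw [List.getD_eq_getElem?_getD]
            simp [List.getElem?_eq_getElem h]
          rw [e2, e3]
          exact hgt
  have mono : ∀ (j i : Nat) (hj : j < T.length) (hij : i < j), T[i]'(by omega) < T[j] := by
    intro j
    induction j with
    | zero => intro i hj hij; omega
    | succ j ihj =>
      intro i hj hij
      rcases Nat.lt_succ_iff_lt_or_eq.mp hij with h | h
      · exact lt_trans (ihj i (by omega) h) (adj j hj)
      · subst h; exact adj i hj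
  rw [List.pairwise_iff_getElem]
  intro a b ha hb hab
  exact mono b a hb hab

theorem pvHead (nums : List Int) (h : nums ≠ []) :
    PySem.List.pyGetD nums 0 0 = nums.headD 0 ∧ nums[0]? = some (nums.headD 0) := by
  cases nums with
  | nil => simp at h
  | cons x t =>
    refine ⟨?_, by simp⟩
    simp [PySem.List.pyGetD, PySem.List.pyGet?, PySem.List.pyIdx?]

theorem pvBridge (nums T : List Int) (n : Int)
    (hperm : T.Perm nums) (hhead : T[0]? = nums[0]?)
    (hnp : ∀ j : Nat, 1 ≤ j → (j : Int) < n - 1 → ¬ pvPeak T j) :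
    (PySem.List.pyRange 1 (n + 1) 1 = T) ↔
      (PySem.List.sorted nums (fun x => x) false = PySem.List.pyRange 1 (n + 1) 1 ∧
        (nums.length = 0 ∨ PySem.List.pyGetD nums 0 0 = 1)) := by
  by_cases hnil : nums = []
  · subst hnil
    have hTnil : T = [] := List.Perm.eq_nil hperm
    subst hTnil
    have hsnil : PySem.List.sorted ([] : List Int) (fun x => x) false = [] :=
      (PySem.List.sorted_eq_nil_iff _ _ _).mpr rfl
    constructor
    · intro h
      exact ⟨by rw [hsnil, h], Or.inl rfl⟩
    · rintro ⟨hs, _⟩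
      rw [hsnil] at hs
      exact hs.symm
  · constructor
    · intro h
      have hRp : (PySem.List.pyRange 1 (n + 1) 1).Perm nums := h ▸ hperm
      refine ⟨PySem.List.sorted_eq_of_perm_of_pairwise_lt _ _ _ hRp
        (PySem.List.pairwise_lt_pyRange_one 1 (n + 1)), Or.inr ?_⟩
      have h1n : (1 : Int) < n + 1 := by
        have h0 : 0 < nums.length := List.length_pos_of_ne_nil hnil
        have hlen : (n + 1 - 1 : Int).toNat = nums.length := by
          rw [← hRp.length_eq, PySem.List.length_pyRange_one]
        omega
      have hT0 : T[0]? = some 1 := by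
        rw [← h, PySem.List.pyRange_one_cons h1n]; rfl
      rw [hhead, (pvHead nums hnil).2] at hT0
      rw [(pvHead nums hnil).1]
      simpa using hT0
    · rintro ⟨hs, hcase⟩
      rcases hcase with h0 | h1
      · exact absurd (List.length_eq_zero_iff.mp h0) hnil
      · have hpnums : nums.Perm (PySem.List.pyRange 1 (n + 1) 1) := by
          have hp := PySem.List.sorted_perm nums (fun x => x) false
          rw [hs] at hp
          exact hp.symm
        have hT0 : T[0]? = some 1 := by
          rw [hhead, (pvHead nums hnil).2, ← (pvHead nums hnil).1, h1]
        have hpw := pvSortedOfNoPeak T n (hperm.trans hpnums) hT0 hnp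
        have hsT : PySem.List.sorted nums (fun x => x) false = T :=
          PySem.List.sorted_eq_of_perm_of_pairwise_lt _ _ _ hperm hpw
        rw [← hs, hsT]

-- ===== VERDICT (by name: the statement is the Claim_ definition above) =====
theorem canBeSorted_spec : Claim_equal_canBeSorted := by
  intro nums n _ hpre
  unfold Spec_canBeSorted
  have hT : (pvLoop n nums 1).Perm nums ∧ (pvLoop n nums 1)[0]? = nums[0]? ∧
      (∀ j : Nat, 1 ≤ j → (j : Int) < n - 1 → ¬ pvPeak (pvLoop n nums 1) j) := by
    rcases hpre with hlen | h2
    · exact pvLoop_spec n nums 1 hlen le_rfl (by intro j hj1 hj2; omega)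
    · rw [pvLoop, if_neg (by omega)]
      exact ⟨List.Perm.refl _, rfl, by intro j hj1 hj2; omega⟩
  obtain ⟨hperm, hhead, hnp⟩ := hT
  unfold canBeSorted canBeSorted_alt
  have hiff := pvBridge nums (pvLoop n nums 1) n hperm hhead hnp
  by_cases hs : PySem.List.sorted nums (fun x => x) false = PySem.List.pyRange 1 (n + 1) 1
  · rw [if_neg (not_not_intro hs), ← Bool.decide_or, decide_eq_decide]
    exact hiff.trans (and_iff_right hs)
  · rw [if_pos hs]
    apply decide_eq_false
    intro h
    exact hs (hiff.mp h).1
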